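-- pv_equiv track=rewrite | github.com/CederGroupHub/WFacer | tests/test_utils/test_comp_constraints.py | _get_dim_sl_ids_from_specie
-- ===== SOURCE A (Python) =====
-- def _get_dim_sl_ids_from_specie(bits, sp):
--     i = 0
--     dim_ids = []
--     sl_ids = []
--     for sl_id, sl_bits in enumerate(bits):
--         for bit in sl_bits:
--             if bit == sp:
--                 dim_ids.append(i)
--                 sl_ids.append(sl_id)
--             i += 1
--     return dim_ids, sl_ids
-- ===== SOURCE B (Python) =====
-- def _get_dim_sl_ids_from_specie(bits, sp):
--     # Build flat tables once, then filter positions and index back.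
--     flat = [bit for sl_bits in bits for bit in sl_bits]
--     sl_of = [sl_id for sl_id, sl_bits in enumerate(bits) for _ in sl_bits]
--     dim_ids = [i for i, b in enumerate(flat) if b == sp]
--     sl_ids = [sl_of[i] for i in dim_ids]
--     return dim_ids, sl_ids
-- ===== Notes on version B (the rewrite author's own statement) =====
-- stated objective: alternative
-- what changed: Replaces the single interleaved scan with a running flat counter by a build-tables-then-filter decomposition: one pass flattens bits and records each position's sublattice id, then positions matching sp are selected by enumerate-filter and sl_ids are recovered by indexing the table.
import Mathlib
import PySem

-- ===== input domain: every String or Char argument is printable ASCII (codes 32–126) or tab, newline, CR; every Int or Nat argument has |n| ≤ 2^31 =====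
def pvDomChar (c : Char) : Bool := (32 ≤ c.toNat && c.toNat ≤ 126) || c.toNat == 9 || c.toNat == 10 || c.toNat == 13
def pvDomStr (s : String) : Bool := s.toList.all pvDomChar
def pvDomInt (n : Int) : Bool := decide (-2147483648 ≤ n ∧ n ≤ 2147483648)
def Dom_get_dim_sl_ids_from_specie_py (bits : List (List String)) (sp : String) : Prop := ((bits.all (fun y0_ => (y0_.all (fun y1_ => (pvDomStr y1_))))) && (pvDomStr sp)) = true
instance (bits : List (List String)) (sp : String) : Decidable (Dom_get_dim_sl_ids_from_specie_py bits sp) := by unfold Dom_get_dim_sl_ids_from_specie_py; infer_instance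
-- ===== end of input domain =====

-- B replaces A's single interleaved scan (running flat counter) with a build-tables-then-filter
-- decomposition; same outputs, same O(n) cost (objective: alternative).

-- ===== PORT A =====
-- literal port: nested for-loops with running counter i and two accumulators
def get_dim_sl_ids_from_specie_py (bits : List (List String)) (sp : String) : List Int × List Int :=
  let st := (PySem.List.enumerate bits 0).foldl
    (fun (st : Int × List Int × List Int) p =>
      p.2.foldl
        (fun (st : Int × List Int × List Int) bit =>
          if bit == sp then (st.1 + 1, st.2.1 ++ [st.1], st.2.2 ++ [p.1])
          else (st.1 + 1, st.2.1, st.2.2))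
        st)
    ((0 : Int), ([] : List Int), ([] : List Int))
  (st.2.1, st.2.2)

-- ===== PORT B =====
-- literal port of Source B: flatten, parallel sublattice table, enumerate-filter, index back
def get_dim_sl_ids_from_specie_py_alt (bits : List (List String)) (sp : String) : List Int × List Int :=
  let flat := bits.flatMap (fun sl_bits => sl_bits)
  let sl_of := (PySem.List.enumerate bits 0).flatMap (fun p => p.2.map (fun _ => p.1))
  let dim_ids := ((PySem.List.enumerate flat 0).filter (fun q => q.2 == sp)).map (fun q => q.1)
  let sl_ids := dim_ids.map (fun i => PySem.List.pyGetD sl_of i 0)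
  (dim_ids, sl_ids)

-- ===== PRECONDITION & SPEC =====
def Spec_get_dim_sl_ids_from_specie_py (bits : List (List String)) (sp : String) (out : List Int × List Int) : Prop := out = get_dim_sl_ids_from_specie_py_alt bits sp
instance (bits : List (List String)) (sp : String) (out : List Int × List Int) : Decidable (Spec_get_dim_sl_ids_from_specie_py bits sp out) := by unfold Spec_get_dim_sl_ids_from_specie_py; infer_instance

-- ===== CLAIM (what is proved, stated in full; the proofs are below) =====
def Claim_equal_get_dim_sl_ids_from_specie_py : Prop := ∀ (bits : List (List String)) (sp : String), Dom_get_dim_sl_ids_from_specie_py bits sp → Spec_get_dim_sl_ids_from_specie_py bits sp (get_dim_sl_ids_from_specie_py bits sp)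

-- ===== LEMMAS AND PROOFS =====

-- reference recursion over the flattened (bit, sl_id) pair list
def pvG (sp : String) : List (String × Int) → Int → List Int × List Int
  | [], _ => ([], [])
  | (b, s) :: t, i =>
    let r := pvG sp t (i + 1)
    if b == sp then (i :: r.1, s :: r.2) else r

def pvPairs (bits : List (List String)) : List (String × Int) :=
  (PySem.List.enumerate bits 0).flatMap (fun p => p.2.map (fun b => (b, p.1)))

-- A's pair-level step
def pvStep (sp : String) (st : Int × List Int × List Int) (q : String × Int) : Int × List Int × List Int :=
  if q.1 == sp then (st.1 + 1, st.2.1 ++ [st.1], st.2.2 ++ [q.2]) else (st.1 + 1, st.2.1, st.2.2)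

theorem pvFoldPairs (sp : String) (ps : List (String × Int)) :
    ∀ (i : Int) (d l : List Int),
      ps.foldl (pvStep sp) (i, d, l)
        = (i + ps.length, d ++ (pvG sp ps i).1, l ++ (pvG sp ps i).2) := by
  induction ps with
  | nil => intro i d l; simp [pvG]
  | cons q t ih =>
    intro i d l
    obtain ⟨b, s⟩ := q
    by_cases hb : b == sp
    · simp [pvStep, pvG, hb, ih (i + 1)]
      omega
    · simp [pvStep, pvG, hb, ih (i + 1)]
      omega

-- nested fold over enumerate = fold over the flattened pair list
theorem pvNested (sp : String) (L : List (Int × List String)) :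
    ∀ (st : Int × List Int × List Int),
      L.foldl (fun st p => p.2.foldl
          (fun (st : Int × List Int × List Int) bit =>
            if bit == sp then (st.1 + 1, st.2.1 ++ [st.1], st.2.2 ++ [p.1])
            else (st.1 + 1, st.2.1, st.2.2)) st) st
        = (L.flatMap (fun p => p.2.map (fun b => (b, p.1)))).foldl (pvStep sp) st := by
  induction L with
  | nil => intro st; simp
  | cons p t ih =>
    intro st
    simp only [List.foldl_cons, List.flatMap_cons, List.foldl_append, ih]
    congr 1
    rw [List.foldl_map]
    rfl

-- characterisations of pvG's two components
theorem pvG_fst (sp : String) (ps : List (String × Int)) :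
    ∀ (i : Int),
      (pvG sp ps i).1
        = ((PySem.List.enumerate ps i).filter (fun q => q.2.1 == sp)).map (fun q => q.1) := by
  induction ps with
  | nil => intro i; simp [pvG, PySem.List.enumerate_nil]
  | cons q t ih =>
    intro i
    obtain ⟨b, s⟩ := q
    by_cases hb : b == sp <;>
      simp [pvG, hb, PySem.List.enumerate_cons, ih (i + 1)]

theorem pvG_snd (sp : String) (ps : List (String × Int)) :
    ∀ (i : Int), (pvG sp ps i).2 = (ps.filter (fun q => q.1 == sp)).map (fun q => q.2) := by
  induction ps with
  | nil => intro i; simp [pvG]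
  | cons q t ih =>
    intro i
    obtain ⟨b, s⟩ := q
    by_cases hb : b == sp <;> simp [pvG, hb, ih (i + 1)]

-- enumerate commutes with map on the payload
theorem pvEnumerate_map {α β : Type} (f : α → β) (l : List α) :
    ∀ (s : Int),
      PySem.List.enumerate (l.map f) s
        = (PySem.List.enumerate l s).map (fun p => (p.1, f p.2)) := by
  induction l with
  | nil => intro s; simp [PySem.List.enumerate_nil]
  | cons x t ih => intro s; simp [PySem.List.enumerate_cons, ih (s + 1)]

theorem pvA_eq_pvG (bits : List (List String)) (sp : String) :
    get_dim_sl_ids_from_specie_py bits sp = pvG sp (pvPairs bits) 0 := by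
  unfold get_dim_sl_ids_from_specie_py
  rw [pvNested sp, pvFoldPairs]
  simp [pvPairs]

theorem pvFlat_eq (bits : List (List String)) :
    bits.flatMap (fun sl => sl) = (pvPairs bits).map (fun q => q.1) := by
  unfold pvPairs
  rw [List.map_flatMap]
  have : bits = (PySem.List.enumerate bits 0).map (fun p => p.2) := by
    simp [PySem.List.map_snd_enumerate]
  conv_lhs => rw [this]
  rw [List.flatMap_map]
  simp [Function.comp_def]

theorem pvSlOf_eq (bits : List (List String)) :
    (PySem.List.enumerate bits 0).flatMap (fun p => p.2.map (fun _ => p.1))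
      = (pvPairs bits).map (fun q => q.2) := by
  unfold pvPairs
  rw [List.map_flatMap]
  simp [List.map_map, Function.comp_def]

theorem pvFilterEnum (sp : String) (l : List (String × Int)) :
    ∀ (s : Int),
      ((PySem.List.enumerate l s).filter (fun q => q.2.1 == sp)).map (fun q => q.2.2)
        = (l.filter (fun q => q.1 == sp)).map (fun q => q.2) := by
  induction l with
  | nil => intro s; simp [PySem.List.enumerate_nil]
  | cons y u ih =>
    intro s
    by_cases hy : y.1 == sp <;>
      simp [PySem.List.enumerate_cons, hy, ih (s + 1)]

theorem pvB_eq_pvG (bits : List (List String)) (sp : String) :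
    get_dim_sl_ids_from_specie_py_alt bits sp = pvG sp (pvPairs bits) 0 := by
  dsimp only [get_dim_sl_ids_from_specie_py_alt]
  rw [pvFlat_eq, pvSlOf_eq]
  set ps := pvPairs bits with hps
  rw [pvEnumerate_map, List.filter_map]
  refine Prod.ext ?_ ?_
  · dsimp only
    rw [pvG_fst, List.map_map]
    rfl
  · dsimp only
    rw [pvG_snd, List.map_map, List.map_map]
    simp only [Function.comp_def]
    have hmem : ∀ q ∈ (PySem.List.enumerate ps 0).filter (fun x => x.2.1 == sp),
        PySem.List.pyGetD (ps.map (fun q => q.2)) (q.1, q.2.1).1 0 = q.2.2 := by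
      intro q hq
      have hq' := List.mem_of_mem_filter hq
      rw [PySem.List.mem_enumerate_iff] at hq'
      obtain ⟨k, hk, rfl⟩ := hq'
      have hcast : ((0 : Int) + k) = ((k : Nat) : Int) := by ring
      simp only [hcast, PySem.List.pyGetD_natCast]
      rw [List.getD_eq_getElem _ _ (by simpa using hk)]
      simp
    rw [List.map_congr_left hmem, pvFilterEnum]

-- ===== VERDICT (by name: the statement is the Claim_ definition above) =====
theorem get_dim_sl_ids_from_specie_py_spec : Claim_equal_get_dim_sl_ids_from_specie_py := by
  intro bits sp _
  unfold Spec_get_dim_sl_ids_from_specie_py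
  rw [pvA_eq_pvG, pvB_eq_pvG]
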